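-- pv_equiv track=rewrite | github.com/mne-tools/mne-bids | mne_bids/dataframe_odict.py | contains_row
-- ===== SOURCE A (Python) =====
-- def contains_row(data, row_data):
--     """Whether the specified row data exists in the OrderedDict """
--     first_column = list(data.keys())[0]
--     potential_indexes = list()
--     for i, value in enumerate(data[first_column]):
--         if value == row_data[0]:
--             potential_indexes.append(i)
--     for i in potential_indexes:
--         contained_row_data = list(data[key][i] for key in data)
--         if row_data == contained_row_data:
--             return True
--     return False
-- ===== SOURCE B (Python) =====
-- def contains_row(data, row_data):
--     """Whether the specified row data exists in the OrderedDict """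
--     row = tuple(row_data)
--     for candidate in zip(*data.values()):
--         if candidate == row:
--             return True
--     return False
-- ===== Notes on version B (the rewrite author's own statement) =====
-- stated objective: idiomatic
-- what changed: Replaced the two-phase scan (collect indexes matching row_data[0] in the first column, then reconstruct each candidate row by per-key dict lookups) with a single pass over whole rows materialized by zip(*data.values()).
import Mathlib
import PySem

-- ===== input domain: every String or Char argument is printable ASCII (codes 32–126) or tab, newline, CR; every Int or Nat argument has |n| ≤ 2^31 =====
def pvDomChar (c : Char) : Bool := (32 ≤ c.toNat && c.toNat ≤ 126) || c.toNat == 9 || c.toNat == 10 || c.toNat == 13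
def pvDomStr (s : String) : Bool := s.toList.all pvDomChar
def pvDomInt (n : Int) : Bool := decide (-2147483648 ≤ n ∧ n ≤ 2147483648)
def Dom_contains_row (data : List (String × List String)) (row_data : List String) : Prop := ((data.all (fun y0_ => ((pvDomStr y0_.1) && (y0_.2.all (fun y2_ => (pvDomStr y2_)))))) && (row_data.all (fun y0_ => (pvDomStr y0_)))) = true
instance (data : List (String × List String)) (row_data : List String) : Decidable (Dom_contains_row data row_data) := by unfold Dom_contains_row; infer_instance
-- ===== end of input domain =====

-- B replaces A's filter-then-reconstruct scan by one idiomatic pass over zipped rows (same cost).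

-- ===== PORT A =====
def contains_row (data : List (String × List String)) (row_data : List String) : Bool :=
  -- first_column = list(data.keys())[0]   (raises IndexError on empty data: outside Pre_)
  match PySem.List.pyGet? (data.map Prod.fst) 0 with
  | none => false
  | some first_column =>
    -- data[first_column]
    let col := (List.lookup first_column data).getD []
    -- first loop: potential_indexes; value == row_data[0]
    -- (row_data[0] raising on empty row_data is outside Pre_; pyGet? returns none there)
    let potential : List Int := (PySem.List.enumerate col 0).foldl
      (fun acc iv => if some iv.2 == PySem.List.pyGet? row_data 0 then acc ++ [iv.1] else acc) []
    -- second loop with early return; data[key][i] out of range (unreached by a True return in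
    -- Python) is outside Pre_
    potential.any (fun i =>
      let contained_row_data := (data.map Prod.fst).map (fun key =>
        PySem.List.pyGetD ((List.lookup key data).getD []) i "")
      decide (row_data = contained_row_data))

-- ===== PORT B =====
-- termination measure for zipRows (cited by decreasing_by)
theorem pvSumTailLt (cols : List (List String)) (h1 : cols ≠ []) (h2 : ∀ c ∈ cols, c ≠ []) :
    ((cols.map List.tail).map List.length).sum < (cols.map List.length).sum := by
  induction cols with
  | nil => exact absurd rfl h1
  | cons c t ih =>
    simp only [List.map_cons, List.sum_cons]
    have hc : c ≠ [] := h2 c (by simp)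
    have hlen : c.tail.length < c.length := by
      cases c with
      | nil => exact absurd rfl hc
      | cons x xs => simp
    cases t with
    | nil => simpa using hlen
    | cons d u =>
      have := ih (by simp) (fun x hx => h2 x (List.mem_cons_of_mem _ hx))
      omega

-- zip(*cols): yields rows while every column still has an element
def zipRows (cols : List (List String)) : List (List String) :=
  if h : cols ≠ [] ∧ ∀ c ∈ cols, c ≠ [] then
    cols.map (fun c => c.headI) :: zipRows (cols.map List.tail)
  else []
termination_by (cols.map List.length).sum
decreasing_by simpa using pvSumTailLt cols h.1 h.2

def contains_row_alt (data : List (String × List String)) (row_data : List String) : Bool :=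
  (zipRows (data.map Prod.snd)).any (fun candidate => decide (candidate = row_data))

-- ===== PRECONDITION & SPEC =====
-- Pre_ excludes exactly the inputs on which the Python A raises IndexError (empty data; empty
-- row_data while the first column is nonempty; a first-column match at an index that some column
-- does not cover AND that A actually reaches, i.e. no earlier covered matching index already
-- yields the full row) and association lists with duplicate keys, which a Python dict argument
-- can never carry.
def Pre_contains_row (data : List (String × List String)) (row_data : List String) : Prop :=
  data ≠ [] ∧ (data.map Prod.fst).Nodup ∧
  (data.headI.2 ≠ [] → row_data ≠ []) ∧
  ∀ k < data.headI.2.length, data.headI.2[k]? = row_data.head? →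
    (∀ p ∈ data, k < p.2.length) ∨
    ∃ k' < k, data.headI.2[k']? = row_data.head? ∧ (∀ p ∈ data, k' < p.2.length) ∧
      row_data = data.map (fun p => p.2.getD k' "")
instance (data : List (String × List String)) (row_data : List String) : Decidable (Pre_contains_row data row_data) := by unfold Pre_contains_row; infer_instance
def pvWitness_contains_row : (List (String × List String)) × List String :=
  ([("a", ["x"]), ("b", ["y"])], ["x", "y"])

def Spec_contains_row (data : List (String × List String)) (row_data : List String) (out : Bool) : Prop := out = contains_row_alt data row_data
instance (data : List (String × List String)) (row_data : List String) (out : Bool) : Decidable (Spec_contains_row data row_data out) := by unfold Spec_contains_row; infer_instance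

-- ===== CLAIM (what is proved, stated in full; the proofs are below) =====
def Claim_equal_contains_row : Prop := ∀ (data : List (String × List String)) (row_data : List String), Dom_contains_row data row_data → Pre_contains_row data row_data → Spec_contains_row data row_data (contains_row data row_data)

-- ===== LEMMAS AND PROOFS =====

-- first-match lookup returns the pair's own value when keys are distinct
theorem pvLookupNodup {data : List (String × List String)}
    (h : (data.map Prod.fst).Nodup) {p : String × List String} (hp : p ∈ data) :
    List.lookup p.1 data = some p.2 := by
  induction data with
  | nil => cases hp
  | cons q t ih =>
    rcases List.mem_cons.mp hp with rfl | hpt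
    · simp [List.lookup]
    · have hne : p.1 ≠ q.1 := by
        intro he
        have : q.1 ∈ t.map Prod.fst := he ▸ List.mem_map.mpr ⟨p, hpt, rfl⟩
        exact (List.nodup_cons.mp (by simpa using h)).1 this
      have ht := ih (List.nodup_cons.mp (by simpa using h)).2 hpt
      have hb : (p.1 == q.1) = false := beq_eq_false_iff_ne.mpr hne
      simp [List.lookup, hb, ht]

-- membership in zip(*cols): exactly the index-wise rows that every column covers
theorem pvZipRowsMem (cols : List (List String)) (hne : cols ≠ []) (r : List String) :
    r ∈ zipRows cols ↔ ∃ j : Nat, (∀ c ∈ cols, j < c.length) ∧ r = cols.map (fun c => c.getD j "") := by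
  generalize hn : (cols.map List.length).sum = n
  induction n using Nat.strong_induction_on generalizing cols with
  | _ n ih =>
  subst hn
  rw [zipRows]
  split
  case isTrue h =>
    rw [List.mem_cons]
    constructor
    · rintro (rfl | hr)
      · refine ⟨0, fun c hc => List.length_pos_of_ne_nil (h.2 c hc), ?_⟩
        apply List.map_congr_left
        intro c hc
        cases c with
        | nil => exact absurd rfl (h.2 _ hc)
        | cons x xs => simp [List.headI]
      · have hne' : cols.map List.tail ≠ [] := by simpa using h.1
        have hlt := pvSumTailLt cols h.1 h.2
        rcases (ih _ hlt _ hne' rfl).mp hr with ⟨j, hj, rfl⟩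
        refine ⟨j + 1, fun c hc => ?_, ?_⟩
        · have hjc := hj c.tail (List.mem_map.mpr ⟨c, hc, rfl⟩)
          have hc' : c ≠ [] := h.2 c hc
          cases c with
          | nil => exact absurd rfl hc'
          | cons x xs => simp at hjc ⊢; omega
        · rw [List.map_map]
          apply List.map_congr_left
          intro c hc
          cases c <;> simp
    · rintro ⟨j, hj, rfl⟩
      cases j with
      | zero =>
        left
        apply List.map_congr_left
        intro c hc
        cases c with
        | nil => exact absurd rfl (h.2 _ hc)
        | cons x xs => simp [List.headI]
      | succ j =>
        right
        have hne' : cols.map List.tail ≠ [] := by simpa using h.1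
        have hlt := pvSumTailLt cols h.1 h.2
        refine (ih _ hlt _ hne' rfl).mpr ⟨j, fun c hc => ?_, ?_⟩
        · rcases List.mem_map.mp hc with ⟨c0, hc0, rfl⟩
          have hjc := hj c0 hc0
          have hc' : c0 ≠ [] := h.2 c0 hc0
          cases c0 with
          | nil => exact absurd rfl hc'
          | cons x xs => simp at hjc ⊢; omega
        · rw [List.map_map]
          apply List.map_congr_left
          intro c hc
          cases c <;> simp
  case isFalse h =>
    push_neg at h
    rcases h hne with ⟨c, hc, hcnil⟩
    simp only [List.not_mem_nil, false_iff, not_exists, not_and]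
    intro j hj
    exact absurd (hj c hc) (by simp [hcnil])

-- what A computes: some index of the first column matches row_data's head and yields the full row
theorem pvAChar (k0 : String) (c0 : List String) (rest : List (String × List String))
    (row_data : List String)
    (hnd : (((k0, c0) :: rest).map Prod.fst).Nodup) :
    contains_row ((k0, c0) :: rest) row_data = true ↔
      ∃ k : Nat, k < c0.length ∧ c0[k]? = row_data.head? ∧
        row_data = ((k0, c0) :: rest).map (fun p => p.2.getD k "") := by
  have hnil : PySem.List.pyGet? (((k0, c0) :: rest).map Prod.fst) 0 = some k0 := by
    simp
  have hcol : (List.lookup k0 ((k0, c0) :: rest)).getD [] = c0 := by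
    simp [List.lookup]
  have hrow : ∀ k : Nat, (((k0, c0) :: rest).map Prod.fst).map (fun key =>
      PySem.List.pyGetD ((List.lookup key ((k0, c0) :: rest)).getD []) (k : Int) "") =
      ((k0, c0) :: rest).map (fun p => p.2.getD k "") := by
    intro k
    rw [List.map_map]
    refine List.map_congr_left (fun p hp => ?_)
    simp only [Function.comp_apply, pvLookupNodup hnd hp, Option.getD_some,
      PySem.List.pyGetD_natCast]
  unfold contains_row
  simp only [hnil, hcol, PySem.List.foldl_append_if, List.nil_append, List.any_map,
    List.any_eq_true, List.mem_filter, Function.comp_apply, decide_eq_true_eq]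
  constructor
  · rintro ⟨iv, ⟨hmem, hcond⟩, heq⟩
    rcases List.mem_iff_getElem?.mp hmem with ⟨k, hk⟩
    rw [PySem.List.getElem?_enumerate] at hk
    rcases Option.map_eq_some_iff.mp hk with ⟨v, hv, rfl⟩
    have hklen : k < c0.length := (List.getElem?_eq_some_iff.mp hv).1
    refine ⟨k, hklen, ?_, ?_⟩
    · have : (some v == PySem.List.pyGet? row_data 0) = true := hcond
      rw [beq_iff_eq] at this
      rw [hv, this, PySem.List.pyGet?_zero, List.head?_eq_getElem?]
    · rw [heq]
      simpa using hrow k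
  · rintro ⟨k, hklen, hhead, hrow_eq⟩
    refine ⟨((k : Int), c0[k]), ⟨?_, ?_⟩, ?_⟩
    · apply List.mem_iff_getElem?.mpr ⟨k, ?_⟩
      rw [PySem.List.getElem?_enumerate]
      simp [List.getElem?_eq_getElem hklen]
    · show (some c0[k] == PySem.List.pyGet? row_data 0) = true
      rw [beq_iff_eq, PySem.List.pyGet?_zero, ← List.head?_eq_getElem?, ← hhead,
        List.getElem?_eq_getElem hklen]
    · rw [hrow_eq]
      simpa using (hrow k).symm

-- what B computes: some row index covered by every column yields the full row
theorem pvBChar (data : List (String × List String)) (hne : data ≠ []) (row_data : List String) :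
    contains_row_alt data row_data = true ↔
      ∃ j : Nat, (∀ p ∈ data, j < p.2.length) ∧ row_data = data.map (fun p => p.2.getD j "") := by
  unfold contains_row_alt
  have hcols : data.map Prod.snd ≠ [] := by simpa using hne
  rw [List.any_eq_true]
  constructor
  · rintro ⟨r, hr, hrd⟩
    rw [decide_eq_true_eq] at hrd
    subst hrd
    rcases (pvZipRowsMem _ hcols _).mp hr with ⟨j, hj, hrw⟩
    refine ⟨j, fun p hp => hj p.2 (List.mem_map.mpr ⟨p, hp, rfl⟩), ?_⟩
    rw [hrw, List.map_map]
    rfl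
  · rintro ⟨j, hj, rfl⟩
    refine ⟨data.map (fun p => p.2.getD j ""), ?_, by simp⟩
    refine (pvZipRowsMem _ hcols _).mpr ⟨j, ?_, by rw [List.map_map]; rfl⟩
    intro c hc
    rcases List.mem_map.mp hc with ⟨p, hp, rfl⟩
    exact hj p hp

-- ===== VERDICT (by name: the statement is the Claim_ definition above) =====
theorem contains_row_spec : Claim_equal_contains_row := by
  intro data row_data _ hpre
  unfold Spec_contains_row
  obtain ⟨hdne, hnd, _, hrange⟩ := hpre
  rcases data with _ | ⟨⟨k0, c0⟩, rest⟩
  · exact absurd rfl hdne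
  rw [Bool.eq_iff_iff, pvAChar k0 c0 rest row_data hnd,
    pvBChar _ (by simp) row_data]
  constructor
  · rintro ⟨k, hklen, hhead, hrw⟩
    rcases hrange k (by simpa using hklen) (by simpa using hhead) with
      hcov | ⟨k', _, _, hcov', hrw'⟩
    · exact ⟨k, hcov, hrw⟩
    · exact ⟨k', hcov', hrw'⟩
  · rintro ⟨j, hj, hrw⟩
    have hjc0 : j < c0.length := by simpa using hj (k0, c0) (List.mem_cons_self)
    refine ⟨j, hjc0, ?_, hrw⟩
    rw [hrw]
    simp [List.getElem?_eq_getElem hjc0]
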